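-- pv_equiv track=rewrite | github.com/krohling/bondai | bondai/tools/shell_tool.py | is_harmful
-- ===== SOURCE A (Python) =====
-- def is_harmful(cmd):
--     # Simple checks for potentially harmful patterns. This should be more exhaustive!
--     harmful_patterns = [
--         'sudo',
--         'dd if=',
--         'mkfs.',
--         '> /dev/',
--         'shutdown',
--         'reboot',
--         'passwd'
--     ]
--     for pattern in harmful_patterns:
--         if pattern in cmd:
--             return True
--     return False
-- ===== SOURCE B (Python) =====
-- HARMFUL_PATTERNS = ('sudo', 'dd if=', 'mkfs.', '> /dev/', 'shutdown', 'reboot', 'passwd')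
--
-- def is_harmful(cmd):
--     # One left-to-right scan: at each position test whether any pattern starts there.
--     for i in range(len(cmd) + 1):
--         if any(cmd.startswith(p, i) for p in HARMFUL_PATTERNS):
--             return True
--     return False
-- ===== Notes on version B (the rewrite author's own statement) =====
-- stated objective: alternative
-- what changed: Replaced the per-pattern substring-containment loop by a single left-to-right scan over positions of cmd that tests at each offset whether any of the 7 patterns starts there.
import Mathlib
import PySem

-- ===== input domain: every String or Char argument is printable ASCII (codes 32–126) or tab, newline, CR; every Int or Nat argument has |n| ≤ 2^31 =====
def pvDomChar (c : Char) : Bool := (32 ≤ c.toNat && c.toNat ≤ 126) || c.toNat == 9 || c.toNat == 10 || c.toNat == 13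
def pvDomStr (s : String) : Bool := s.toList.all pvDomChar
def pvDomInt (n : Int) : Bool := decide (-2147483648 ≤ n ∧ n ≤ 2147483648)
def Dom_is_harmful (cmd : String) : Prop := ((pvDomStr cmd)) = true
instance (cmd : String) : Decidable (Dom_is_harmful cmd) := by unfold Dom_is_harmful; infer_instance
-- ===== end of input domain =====

-- B replaces A's per-pattern 'pattern in cmd' loop by one left-to-right scan over
-- positions of cmd, testing at each offset whether some pattern starts there (alternative).

-- ===== PORT A =====
def harmfulPatterns : List String :=
  ["sudo", "dd if=", "mkfs.", "> /dev/", "shutdown", "reboot", "passwd"]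

-- 'for pattern in harmful_patterns: if pattern in cmd: return True' / 'return False'
def harmfulLoopA (cmd : String) : List String → Bool
  | [] => false
  | p :: ps => if PySem.Str.isIn p cmd then true else harmfulLoopA cmd ps

def is_harmful (cmd : String) : Bool := harmfulLoopA cmd harmfulPatterns

-- ===== PORT B =====
def harmfulPatternsB : List (List Char) :=
  ["sudo", "dd if=", "mkfs.", "> /dev/", "shutdown", "reboot", "passwd"].map String.toList

-- 'any(cmd.startswith(p, i) for p in HARMFUL_PATTERNS)' at suffix l = cmd[i:]
def hitsHere (l : List Char) : Bool := harmfulPatternsB.any (fun p => p.isPrefixOf l)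

-- 'for i in range(len(cmd)+1): if any(...): return True' / 'return False':
-- structural scan over the successive suffixes of cmd.
def scanB : List Char → Bool
  | [] => hitsHere []
  | c :: t => if hitsHere (c :: t) then true else scanB t

def is_harmful_alt (cmd : String) : Bool := scanB cmd.toList

-- ===== PRECONDITION & SPEC =====
def Spec_is_harmful (cmd : String) (out : Bool) : Prop := out = is_harmful_alt cmd
instance (cmd : String) (out : Bool) : Decidable (Spec_is_harmful cmd out) := by unfold Spec_is_harmful; infer_instance

-- ===== CLAIM (what is proved, stated in full; the proofs are below) =====
def Claim_equal_is_harmful : Prop := ∀ (cmd : String), Dom_is_harmful cmd → Spec_is_harmful cmd (is_harmful cmd)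

-- ===== LEMMAS AND PROOFS =====
theorem scanB_eq_true_iff (l : List Char) :
    scanB l = true ↔ ∃ p ∈ harmfulPatternsB, p <:+: l := by
  induction l with
  | nil =>
    simp [scanB, hitsHere, List.any_eq_true]
  | cons c t ih =>
    simp only [scanB]
    split_ifs with h
    · simp only [true_iff]
      simp only [hitsHere, List.any_eq_true, List.isPrefixOf_iff_prefix] at h
      obtain ⟨p, hp, hpre⟩ := h
      exact ⟨p, hp, hpre.isInfix⟩
    · simp only [hitsHere, List.any_eq_true, List.isPrefixOf_iff_prefix] at h
      push Not at h
      rw [ih]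
      constructor
      · rintro ⟨p, hp, hinf⟩
        exact ⟨p, hp, hinf.trans (List.suffix_cons c t).isInfix⟩
      · rintro ⟨p, hp, hinf⟩
        rcases List.infix_cons_iff.mp hinf with hpre | hinf'
        · exact absurd hpre (h p hp)
        · exact ⟨p, hp, hinf'⟩

theorem harmfulLoopA_eq_true_iff (cmd : String) (ps : List String) :
    harmfulLoopA cmd ps = true ↔ ∃ p ∈ ps, p.toList <:+: cmd.toList := by
  induction ps with
  | nil => simp [harmfulLoopA]
  | cons p ps ih =>
    simp only [harmfulLoopA]
    split_ifs with h
    · simp only [true_iff]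
      exact ⟨p, List.mem_cons_self, (PySem.Str.isIn_iff_infix p cmd).mp h⟩
    · rw [ih]
      constructor
      · rintro ⟨q, hq, hinf⟩; exact ⟨q, List.mem_cons_of_mem _ hq, hinf⟩
      · rintro ⟨q, hq, hinf⟩
        rcases List.mem_cons.mp hq with rfl | hq'
        · exact absurd ((PySem.Str.isIn_iff_infix q cmd).mpr hinf) (by simpa using h)
        · exact ⟨q, hq', hinf⟩

-- ===== VERDICT (by name: the statement is the Claim_ definition above) =====
theorem is_harmful_spec : Claim_equal_is_harmful := by
  intro cmd _
  unfold Spec_is_harmful is_harmful is_harmful_alt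
  rw [Bool.eq_iff_iff, harmfulLoopA_eq_true_iff, scanB_eq_true_iff]
  constructor
  · rintro ⟨p, hp, hinf⟩
    exact ⟨p.toList, List.mem_map.mpr ⟨p, hp, rfl⟩, hinf⟩
  · rintro ⟨p, hp, hinf⟩
    simp only [harmfulPatternsB, List.mem_map] at hp
    obtain ⟨q, hq, rfl⟩ := hp
    exact ⟨q, hq, hinf⟩
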